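-- pv_equiv track=rewrite | github.com/augustallen/advent-of-code | Day 4/scratch.py | same_adjacent_fails2
-- ===== SOURCE A (Python) =====
-- def same_adjacent_fails2(number):
--     counter=0
--     for char in str(number):
--         if counter<(len(str(number))-1):
--             counter += 1
--
--             if char == str(number)[counter]:
--                 if counter == (len(str(number))-1):
--                     return True
--                 if char == str(number)[counter+1]:
--                     return False
--     return False
-- ===== SOURCE B (Python) =====
-- def same_adjacent_fails2(number):
--     # Run-length encoding: lengths[i] is the length of the i-th maximal run
--     # of equal characters in str(number).
--     lengths = []
--     prev = None
--     for ch in str(number):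
--         if ch == prev:
--             lengths[-1] += 1
--         else:
--             lengths.append(1)
--             prev = ch
--     # True iff the final run is exactly a pair and no run is a triple or longer.
--     return lengths[-1] == 2 and max(lengths) <= 2
-- ===== Notes on version B (the rewrite author's own statement) =====
-- stated objective: alternative
-- what changed: B builds the run-length encoding of str(number) and decides the answer as a property of the run-length list (last run == 2 and longest run <= 2), instead of A's index-based adjacent/triple character scan with a counter.
import Mathlib
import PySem

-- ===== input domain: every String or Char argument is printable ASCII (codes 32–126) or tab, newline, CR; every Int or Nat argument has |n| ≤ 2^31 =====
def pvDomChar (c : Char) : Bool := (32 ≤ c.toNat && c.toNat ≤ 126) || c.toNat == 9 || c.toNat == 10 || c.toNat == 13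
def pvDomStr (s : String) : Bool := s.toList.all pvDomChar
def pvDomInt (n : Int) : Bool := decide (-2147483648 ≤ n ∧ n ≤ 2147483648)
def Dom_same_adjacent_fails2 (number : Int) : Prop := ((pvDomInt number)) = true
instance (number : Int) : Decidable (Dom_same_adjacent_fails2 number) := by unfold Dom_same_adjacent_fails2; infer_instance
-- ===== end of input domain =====

-- B builds the run-length encoding of str(number) and decides the answer as a
-- property of the run-length list (last run == 2, longest run <= 2), instead of
-- A's index-based adjacent/triple character scan (objective: alternative).


-- ===== PORT A =====
-- the 'for char in str(number)' loop with its counter and early returns;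
-- 'str(number)[counter]' / '[counter+1]' are always in range when evaluated,
-- so comparing against 'some char' is exact
def sameAdjLoopA (s : List Char) : List Char → Int → Bool
  | [], _ => false
  | c :: rest, counter =>
    if counter < (s.length : Int) - 1 then
      let counter := counter + 1
      if PySem.List.pyGet? s counter = some c then
        if counter = (s.length : Int) - 1 then true
        else if PySem.List.pyGet? s (counter + 1) = some c then false
        else sameAdjLoopA s rest counter
      else sameAdjLoopA s rest counter
    else sameAdjLoopA s rest counter

def same_adjacent_fails2 (number : Int) : Bool :=
  let s := (PySem.Int.toStr number).toList
  sameAdjLoopA s s 0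

-- ===== PORT B =====
-- 'lengths[-1] += 1' : increment the last element of the run-length list
def incLast : List Int → List Int
  | [] => []
  | [x] => [x + 1]
  | x :: y :: t => x :: incLast (y :: t)

-- the 'for ch in str(number)' loop building the run-length encoding
def runsLoop : List Char → Option Char → List Int → List Int
  | [], _, lengths => lengths
  | ch :: rest, prev, lengths =>
    if some ch = prev then runsLoop rest prev (incLast lengths)
    else runsLoop rest (some ch) (lengths ++ [1])

-- 'lengths[-1] == 2 and max(lengths) <= 2'; str(number) is never empty, so
-- lengths is nonempty and the Option cases for [-1] / max are exact
def same_adjacent_fails2_alt (number : Int) : Bool :=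
  let s := (PySem.Int.toStr number).toList
  let lengths := runsLoop s none []
  decide (PySem.List.pyGet? lengths (-1) = some (2 : Int)) &&
    (match PySem.List.max? lengths (fun x => x) with
     | some m => decide (m ≤ 2)
     | none => false)

-- ===== PRECONDITION & SPEC =====
def Spec_same_adjacent_fails2 (number : Int) (out : Bool) : Prop := out = same_adjacent_fails2_alt number
instance (number : Int) (out : Bool) : Decidable (Spec_same_adjacent_fails2 number out) := by unfold Spec_same_adjacent_fails2; infer_instance

-- ===== CLAIM (what is proved, stated in full; the proofs are below) =====
def Claim_equal_same_adjacent_fails2 : Prop := ∀ (number : Int), Dom_same_adjacent_fails2 number → Spec_same_adjacent_fails2 number (same_adjacent_fails2 number)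

-- ===== LEMMAS AND PROOFS =====

-- one-step unfolding of A's loop
theorem sameAdjLoopA_cons (s : List Char) (c : Char) (rest : List Char) (counter : Int) :
    sameAdjLoopA s (c :: rest) counter =
      (if counter < (s.length : Int) - 1 then
        if PySem.List.pyGet? s (counter + 1) = some c then
          if counter + 1 = (s.length : Int) - 1 then true
          else if PySem.List.pyGet? s (counter + 1 + 1) = some c then false
          else sameAdjLoopA s rest (counter + 1)
        else sameAdjLoopA s rest (counter + 1)
      else sameAdjLoopA s rest counter) := rfl

-- reference form of A's loop, expressed on the current suffix only
def gRef : List Char → Bool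
  | a :: b :: c :: rest =>
    if a = b then (if a = c then false else gRef (b :: c :: rest))
    else gRef (b :: c :: rest)
  | [a, b] => a = b
  | _ => false

theorem sameAdjLoopA_eq_gRef (u : List Char) : ∀ (s : List Char) (i : Nat),
    s.drop i = u → sameAdjLoopA s u (i : Int) = gRef u := by
  induction u with
  | nil => intro s i h; simp [sameAdjLoopA, gRef]
  | cons a rs ih =>
    intro s i h
    have hlen : i + rs.length + 1 = s.length := by
      have := congrArg List.length h
      simp at this; omega
    have hget : ∀ (k : Nat), s[i + k]? = (a :: rs)[k]? := by
      intro k; rw [← h, List.getElem?_drop]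
    rcases rs with _ | ⟨b, rs'⟩
    · have hi : ¬ ((i : Int) < (s.length : Int) - 1) := by
        simp at hlen; omega
      simp [sameAdjLoopA, hi, gRef]
    · have hi : (i : Int) < (s.length : Int) - 1 := by
        simp at hlen; omega
      have hdrop1 : s.drop (i + 1) = b :: rs' := by
        have := congrArg (List.drop 1) h
        rw [List.drop_drop] at this
        simpa [Nat.add_comm] using this
      have hgetb : PySem.List.pyGet? s ((i : Int) + 1) = some b := by
        rw [show ((i : Int) + 1) = ((i + 1 : Nat) : Int) by push_cast; ring,
          PySem.List.pyGet?_natCast]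
        simpa using hget 1
      have hIH := ih s (i + 1) hdrop1
      rw [show ((i + 1 : Nat) : Int) = (i : Int) + 1 by push_cast; ring] at hIH
      rcases rs' with _ | ⟨c, rs''⟩
      · -- u = [a, b]: counter+1 is the last index
        have hlast : (i : Int) + 1 = (s.length : Int) - 1 := by
          simp at hlen; omega
        by_cases hab : a = b
        · subst hab
          rw [sameAdjLoopA_cons]
          rw [if_pos hi, if_pos hgetb, if_pos hlast]
          simp [gRef]
        · have hne : ¬ (PySem.List.pyGet? s ((i : Int) + 1) = some a) := by
            rw [hgetb]; intro hh; exact hab (Option.some.inj hh).symm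
          have hi2 : ¬ ((i : Int) + 1 < (s.length : Int) - 1) := by omega
          rw [sameAdjLoopA_cons, if_pos hi, if_neg hne, sameAdjLoopA_cons, if_neg hi2]
          simp [sameAdjLoopA, gRef, hab]
      · -- u = a :: b :: c :: rs''
        have hnl : ¬ ((i : Int) + 1 = (s.length : Int) - 1) := by
          simp at hlen; omega
        have hgetc : PySem.List.pyGet? s ((i : Int) + 1 + 1) = some c := by
          rw [show ((i : Int) + 1 + 1) = ((i + 2 : Nat) : Int) by push_cast; ring,
            PySem.List.pyGet?_natCast]
          simpa using hget 2
        by_cases hab : a = b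
        · subst hab
          by_cases hac : a = c
          · subst hac
            rw [sameAdjLoopA_cons]
            rw [if_pos hi, if_pos hgetb, if_neg hnl, if_pos hgetc]
            simp [gRef]
          · have hnec : ¬ (PySem.List.pyGet? s ((i : Int) + 1 + 1) = some a) := by
              rw [hgetc]; intro hh; exact hac (Option.some.inj hh).symm
            rw [sameAdjLoopA_cons]
            rw [if_pos hi, if_pos hgetb, if_neg hnl, if_neg hnec, hIH]
            simp [gRef, hac]
        · have hne : ¬ (PySem.List.pyGet? s ((i : Int) + 1) = some a) := by
            rw [hgetb]; intro hh; exact hab (Option.some.inj hh).symm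
          rw [sameAdjLoopA_cons]
          rw [if_pos hi, if_neg hne, hIH]
          simp [gRef, hab]

-- last two elements equal (and length ≥ 2)
def lastPairEq : List Char → Bool
  | [a, b] => a = b
  | _ :: b :: rest => lastPairEq (b :: rest)
  | _ => false

-- no three consecutive equal elements
def noTriple : List Char → Bool
  | a :: b :: c :: rest => if a = b ∧ b = c then false else noTriple (b :: c :: rest)
  | _ => true

theorem gRef_eq (u : List Char) : gRef u = (lastPairEq u && noTriple u) := by
  induction u with
  | nil => simp [gRef, lastPairEq]
  | cons a rs ih =>
    match rs, ih with
    | [], _ => simp [gRef, lastPairEq, noTriple]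
    | [b], _ => by_cases hab : a = b <;> simp [gRef, lastPairEq, noTriple, hab]
    | b :: c :: rs', ih =>
      have hlp : lastPairEq (a :: b :: c :: rs') = lastPairEq (b :: c :: rs') := rfl
      by_cases hab : a = b
      · subst hab
        by_cases hac : a = c
        · subst hac
          simp [gRef, noTriple, hlp]
        · simp [gRef, noTriple, hlp, hac, ih]
      · have hnt : ¬ (a = b ∧ b = c) := by tauto
        simp [gRef, noTriple, hlp, hab, ih]

-- dropping a prefix keeps the last pair, as long as two elements remain
theorem lastPairEq_append (xs u : List Char) (hu : 2 ≤ u.length) :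
    lastPairEq (xs ++ u) = lastPairEq u := by
  induction xs with
  | nil => rfl
  | cons x xs ih =>
    rcases hxs : xs ++ u with _ | ⟨y, _ | ⟨z, r⟩⟩
    · have := congrArg List.length hxs
      simp only [List.length_append, List.length_nil] at this; omega
    · have := congrArg List.length hxs
      simp only [List.length_append, List.length_cons, List.length_nil] at this; omega
    · rw [List.cons_append, hxs,
        show lastPairEq (x :: y :: z :: r) = lastPairEq (y :: z :: r) from rfl,
        ← hxs, ih]

theorem lastPairEq_replicate_concat (n : Nat) (p c : Char) (hpc : p ≠ c) (hn : 1 ≤ n) :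
    lastPairEq (List.replicate n p ++ [c]) = false := by
  obtain ⟨m, rfl⟩ : ∃ m, n = m + 1 := ⟨n - 1, by omega⟩
  rw [List.replicate_succ', List.append_assoc,
    lastPairEq_append _ ([p] ++ [c]) (by simp)]
  simp [lastPairEq, hpc]

theorem lastPairEq_and_noTriple_replicate (n : Nat) (p : Char) :
    (lastPairEq (List.replicate n p) && noTriple (List.replicate n p)) = decide (n = 2) := by
  match n with
  | 0 => simp [lastPairEq]
  | 1 => simp [lastPairEq, List.replicate]
  | 2 => simp [lastPairEq, noTriple, List.replicate]
  | (m + 3) =>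
    have : List.replicate (m + 3) p = p :: p :: p :: List.replicate m p := by
      simp [List.replicate_succ]
    rw [this]
    simp [noTriple]

theorem noTriple_head_ne (p c : Char) (t : List Char) (hpc : p ≠ c) :
    noTriple (p :: c :: t) = noTriple (c :: t) := by
  cases t with
  | nil => simp [noTriple]
  | cons d t' => simp [noTriple, hpc]

theorem noTriple_replicate_append (n : Nat) (p c : Char) (t : List Char) (hpc : p ≠ c) :
    noTriple (List.replicate n p ++ (c :: t)) = (decide (n ≤ 2) && noTriple (c :: t)) := by
  match n with
  | 0 => simp
  | 1 => simp [List.replicate, noTriple_head_ne p c t hpc]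
  | 2 =>
    have h2 : List.replicate 2 p ++ (c :: t) = p :: p :: c :: t := by
      simp [List.replicate]
    rw [h2, show noTriple (p :: p :: c :: t)
        = (if p = p ∧ p = c then false else noTriple (p :: c :: t)) from rfl]
    simp [hpc, noTriple_head_ne p c t hpc]
  | (m + 3) =>
    have : List.replicate (m + 3) p ++ (c :: t)
        = p :: p :: p :: (List.replicate m p ++ (c :: t)) := by
      simp [List.replicate_succ]
    rw [this]
    simp [noTriple]

-- the run-level residual predicate: scanning t with current run of n copies of p
def runF : List Char → Char → Nat → Bool
  | [], _, n => decide (n = 2)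
  | c :: t, p, n => if c = p then runF t p (n + 1) else (decide (n ≤ 2) && runF t c 1)

theorem runF_eq (t : List Char) : ∀ (p : Char) (n : Nat), 1 ≤ n →
    runF t p n = (lastPairEq (List.replicate n p ++ t) && noTriple (List.replicate n p ++ t)) := by
  induction t with
  | nil => intro p n _; simpa using (lastPairEq_and_noTriple_replicate n p).symm
  | cons c t ih =>
    intro p n hn
    by_cases hcp : c = p
    · subst hcp
      rw [show runF (c :: t) c n = runF t c (n + 1) from by simp [runF],
        ih c (n + 1) (by omega)]
      congr 2 <;>
        rw [show List.replicate n c ++ (c :: t) = (List.replicate n c ++ [c]) ++ t from by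
            simp, ← List.replicate_succ']
    · have hpc : p ≠ c := fun h => hcp h.symm
      rw [show runF (c :: t) p n = (decide (n ≤ 2) && runF t c 1) from by simp [runF, hcp],
        ih c 1 (by omega)]
      have hrep1 : List.replicate 1 c ++ t = c :: t := by simp [List.replicate]
      rw [hrep1, noTriple_replicate_append n p c t hpc]
      cases t with
      | nil =>
        rw [lastPairEq_replicate_concat n p c hpc hn]
        simp [lastPairEq]
      | cons d t' =>
        rw [lastPairEq_append (List.replicate n p) (c :: d :: t') (by simp)]
        cases lastPairEq (c :: d :: t') <;> cases noTriple (c :: d :: t') <;>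
          cases decide (n ≤ 2) <;> simp

-- the final check B performs on a run-length list
def runCheck (lengths : List Int) : Bool :=
  decide (PySem.List.pyGet? lengths (-1) = some (2 : Int)) &&
    (match PySem.List.max? lengths (fun x => x) with
     | some m => decide (m ≤ 2)
     | none => false)

theorem foldl_max_le_all (t : List Int) : ∀ x : Int,
    decide (t.foldl max x ≤ 2) = (decide (x ≤ 2) && t.all (fun y => decide (y ≤ 2))) := by
  induction t with
  | nil => simp
  | cons y t ih =>
    intro x
    rw [List.foldl_cons, ih (max x y)]
    simp only [List.all_cons, ← Bool.and_assoc]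
    congr 1
    rw [Bool.eq_iff_iff]
    simp

theorem runCheck_concat (acc : List Int) (k : Int) :
    runCheck (acc ++ [k]) = (decide (k = 2) && acc.all (fun x => decide (x ≤ 2))) := by
  unfold runCheck
  rw [PySem.List.pyGet?_neg_one, List.getLast?_concat]
  rcases acc with _ | ⟨a, acc⟩
  · rw [show ([] : List Int) ++ [k] = [k] from rfl, PySem.List.max?_id_cons]
    simp only [List.foldl_nil, List.all_nil, Bool.and_true]
    rw [Bool.eq_iff_iff]
    simp only [Bool.and_eq_true, decide_eq_true_eq, Option.some.injEq]
    omega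
  · rw [List.cons_append, PySem.List.max?_id_cons]
    simp only [foldl_max_le_all, List.all_append, List.all_cons, List.all_nil, Bool.and_true]
    rw [Bool.eq_iff_iff]
    simp only [Bool.and_eq_true, decide_eq_true_eq, Option.some.injEq]
    have hkk : k = 2 → k ≤ 2 := by omega
    tauto

theorem incLast_concat (acc : List Int) (x : Int) :
    incLast (acc ++ [x]) = acc ++ [x + 1] := by
  induction acc with
  | nil => rfl
  | cons a acc ih =>
    rcases hxs : acc ++ [x] with _ | ⟨y, r⟩
    · have := congrArg List.length hxs; simp at this
    · rw [List.cons_append, hxs, show incLast (a :: y :: r) = a :: incLast (y :: r) from rfl,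
        ← hxs, ih, List.cons_append]

theorem runsLoop_invariant (rest : List Char) : ∀ (p : Char) (n : Nat) (acc : List Int),
    runCheck (runsLoop rest (some p) (acc ++ [(n : Int)]))
      = (acc.all (fun x => decide (x ≤ 2)) && runF rest p n) := by
  induction rest with
  | nil =>
    intro p n acc
    rw [show runsLoop [] (some p) (acc ++ [(n : Int)]) = acc ++ [(n : Int)] from rfl,
      runCheck_concat]
    have h2 : decide ((n : Int) = 2) = decide (n = 2) := by
      rw [Bool.eq_iff_iff]; simp; omega
    rw [h2]
    simp [runF, Bool.and_comm]
  | cons ch rest ih =>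
    intro p n acc
    by_cases hch : ch = p
    · subst hch
      rw [show runsLoop (ch :: rest) (some ch) (acc ++ [(n : Int)])
          = runsLoop rest (some ch) (incLast (acc ++ [(n : Int)])) from by
            simp [runsLoop],
        incLast_concat, show ((n : Int) + 1) = ((n + 1 : Nat) : Int) from by push_cast; ring,
        ih ch (n + 1) acc]
      simp [runF]
    · have hne : ¬ (some ch = some p) := by simpa using hch
      rw [show runsLoop (ch :: rest) (some p) (acc ++ [(n : Int)])
          = runsLoop rest (some ch) ((acc ++ [(n : Int)]) ++ [1]) from by
            simp [runsLoop, hne],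
        show ((1 : Int)) = ((1 : Nat) : Int) from rfl,
        ih ch 1 (acc ++ [(n : Int)])]
      rw [show runF (ch :: rest) p n = (decide (n ≤ 2) && runF rest ch 1) from by
        simp [runF, hch]]
      simp only [List.all_append, List.all_cons, List.all_nil, Bool.and_true]
      have : decide ((n : Int) ≤ 2) = decide (n ≤ 2) := by
        rw [Bool.eq_iff_iff]; simp
      rw [this]
      cases acc.all (fun x => decide (x ≤ 2)) <;> cases decide (n ≤ 2) <;> simp

-- B on an arbitrary character list equals A's characterisation
theorem alt_core (s : List Char) :
    runCheck (runsLoop s none []) = (lastPairEq s && noTriple s) := by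
  cases s with
  | nil =>
    rw [show runsLoop [] none [] = [] from rfl]
    simp [runCheck, PySem.List.pyGet?_neg_one, lastPairEq]
  | cons a t =>
    rw [show runsLoop (a :: t) none [] = runsLoop t (some a) ([] ++ [((1 : Nat) : Int)]) from by
        simp [runsLoop],
      runsLoop_invariant t a 1 [], runF_eq t a 1 (by omega)]
    simp [List.replicate]

-- ===== VERDICT (by name: the statement is the Claim_ definition above) =====
theorem same_adjacent_fails2_spec : Claim_equal_same_adjacent_fails2 := by
  intro number _
  unfold Spec_same_adjacent_fails2 same_adjacent_fails2 same_adjacent_fails2_alt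
  simp only
  rw [show (0 : Int) = ((0 : Nat) : Int) from rfl,
    sameAdjLoopA_eq_gRef _ _ 0 (by simp), gRef_eq]
  exact (alt_core _).symm
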